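-- pv_equiv track=rewrite | github.com/kkuntner/advent-of-code-2024 | 21/twentyone.py | get_safe_paths_from
-- ===== SOURCE A (Python) =====
-- def get_safe_paths_from(paths, start):
--     buttons = dict([('7', (0,0)), ('8', (0,1)), ('9', (0,2)), ('4', (1,0)), ('5', (1,1)), ('6', (1,2)), ('1', (2,0)), ('2', (2,1)), ('3', (2,2)), ('0', (3,1)), ('A', (3,2))])
--     nuke_button = (3, 0)
--
--     start_coord = buttons[start]
--
--     result = []
--
--     for path in paths:
--         curr = start_coord
--         for c in path:
--             if c == "<":
--                 curr = (curr[0], curr[1]-1)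
--             elif c == ">":
--                 curr = (curr[0], curr[1]+1)
--             elif c == "^":
--                 curr = (curr[0]-1, curr[1])
--             elif c == "v":
--                 curr = (curr[0]+1, curr[1])
--             if curr == nuke_button:
--                 break
--         if curr != nuke_button:
--             result.append(path)
--
--     return result
-- ===== SOURCE B (Python) =====
-- def get_safe_paths_from(paths, start):
--     buttons = dict([('7', (0,0)), ('8', (0,1)), ('9', (0,2)), ('4', (1,0)), ('5', (1,1)), ('6', (1,2)), ('1', (2,0)), ('2', (2,1)), ('3', (2,2)), ('0', (3,1)), ('A', (3,2))])
--     delta = {'<': (0, -1), '>': (0, 1), '^': (-1, 0), 'v': (1, 0)}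
--
--     def positions(path):
--         # every coordinate visited while typing the path, start included
--         pos = [buttons[start]]
--         for ch in path:
--             dr, dc = delta.get(ch, (0, 0))
--             r, c = pos[-1]
--             pos.append((r + dr, c + dc))
--         return pos
--
--     return [p for p in paths if (3, 0) not in positions(p)]
-- ===== Notes on version B (the rewrite author's own statement) =====
-- stated objective: alternative
-- what changed: B replaces A's interleaved walk-and-check with early break by a delta-table scan that builds the full list of visited coordinates per path and keeps the path iff the forbidden cell (3,0) is absent (a single membership test, no if/elif ladder, no break).
-- outside the precondition, e.g. on get_safe_paths_from(['<'], 'X'): A raises KeyError, B raises KeyError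
import Mathlib
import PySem

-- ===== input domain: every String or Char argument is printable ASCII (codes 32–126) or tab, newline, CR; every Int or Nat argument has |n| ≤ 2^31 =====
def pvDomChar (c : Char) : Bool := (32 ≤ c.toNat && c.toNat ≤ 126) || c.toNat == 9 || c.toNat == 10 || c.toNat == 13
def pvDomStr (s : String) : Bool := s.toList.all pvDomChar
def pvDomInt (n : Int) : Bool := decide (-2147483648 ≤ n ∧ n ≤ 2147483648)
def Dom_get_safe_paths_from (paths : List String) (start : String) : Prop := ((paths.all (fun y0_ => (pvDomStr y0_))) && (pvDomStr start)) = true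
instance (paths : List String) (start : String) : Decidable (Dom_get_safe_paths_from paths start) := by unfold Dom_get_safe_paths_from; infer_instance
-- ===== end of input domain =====

-- B builds, per path, the full list of visited coordinates (via a move-delta table) and keeps the
-- path iff the forbidden cell (3,0) is absent; A instead walks step by step with an if/elif ladder
-- and an early break.  Same cost; return values proved equal on Pre_.

-- ===== PORT A =====
def pvAButtons : PySem.Dict String (Int × Int) :=
  PySem.Dict.ofList [("7",(0,0)), ("8",(0,1)), ("9",(0,2)), ("4",(1,0)), ("5",(1,1)), ("6",(1,2)),
                     ("1",(2,0)), ("2",(2,1)), ("3",(2,2)), ("0",(3,1)), ("A",(3,2))]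

-- inner 'for c in path' loop with its early break; KeyError on buttons[start] is excluded by Pre_
def pvAWalk (curr : Int × Int) : List Char → Int × Int
  | [] => curr
  | c :: rest =>
    let curr' :=
      if c = '<' then (curr.1, curr.2 - 1)
      else if c = '>' then (curr.1, curr.2 + 1)
      else if c = '^' then (curr.1 - 1, curr.2)
      else if c = 'v' then (curr.1 + 1, curr.2)
      else curr
    if curr' = ((3 : Int), (0 : Int)) then curr' else pvAWalk curr' rest

def get_safe_paths_from (paths : List String) (start : String) : List String :=
  let start_coord := (pvAButtons.get? start).getD (0, 0)
  paths.foldl (fun result path =>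
    if pvAWalk start_coord path.toList ≠ ((3 : Int), (0 : Int)) then result ++ [path] else result) []

-- ===== PORT B =====
def pvBButtons : PySem.Dict String (Int × Int) :=
  PySem.Dict.ofList [("7",(0,0)), ("8",(0,1)), ("9",(0,2)), ("4",(1,0)), ("5",(1,1)), ("6",(1,2)),
                     ("1",(2,0)), ("2",(2,1)), ("3",(2,2)), ("0",(3,1)), ("A",(3,2))]

def pvBDelta : PySem.Dict Char (Int × Int) :=
  PySem.Dict.ofList [('<', (0, -1)), ('>', (0, 1)), ('^', (-1, 0)), ('v', (1, 0))]

-- every coordinate visited while typing the path, start included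
def pvBPositions (cur : Int × Int) : List Char → List (Int × Int)
  | [] => [cur]
  | ch :: rest =>
    let d := pvBDelta.getD ch (0, 0)
    cur :: pvBPositions (cur.1 + d.1, cur.2 + d.2) rest

def get_safe_paths_from_alt (paths : List String) (start : String) : List String :=
  let sc := (pvBButtons.get? start).getD (0, 0)
  paths.filter (fun p => ((3 : Int), (0 : Int)) ∉ pvBPositions sc p.toList)

-- ===== PRECONDITION & SPEC =====
-- Pre_ excludes exactly the starts absent from the keypad, on which Python A raises KeyError.
def Pre_get_safe_paths_from (paths : List String) (start : String) : Prop :=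
  start ∈ ["7", "8", "9", "4", "5", "6", "1", "2", "3", "0", "A"]
instance (paths : List String) (start : String) : Decidable (Pre_get_safe_paths_from paths start) := by
  unfold Pre_get_safe_paths_from; infer_instance

def pvWitness_get_safe_paths_from : List String × String := (["<v<", "^^", "A"], "0")

def Spec_get_safe_paths_from (paths : List String) (start : String) (out : List String) : Prop := out = get_safe_paths_from_alt paths start
instance (paths : List String) (start : String) (out : List String) : Decidable (Spec_get_safe_paths_from paths start out) := by unfold Spec_get_safe_paths_from; infer_instance

-- ===== CLAIM (what is proved, stated in full; the proofs are below) =====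
def Claim_equal_get_safe_paths_from : Prop := ∀ (paths : List String) (start : String), Dom_get_safe_paths_from paths start → Pre_get_safe_paths_from paths start → Spec_get_safe_paths_from paths start (get_safe_paths_from paths start)

-- ===== LEMMAS AND PROOFS =====

-- literal forms of the two dicts (rfl)
theorem pvBDelta_mk : pvBDelta = PySem.Dict.mk [('<', (0, -1)), ('>', (0, 1)), ('^', (-1, 0)), ('v', (1, 0))] := rfl

-- A's if/elif step equals "add the delta-table entry"
theorem pvStep_eq (cur : Int × Int) (c : Char) :
    (if c = '<' then (cur.1, cur.2 - 1)
     else if c = '>' then (cur.1, cur.2 + 1)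
     else if c = '^' then (cur.1 - 1, cur.2)
     else if c = 'v' then (cur.1 + 1, cur.2)
     else cur)
    = (cur.1 + (pvBDelta.getD c (0, 0)).1, cur.2 + (pvBDelta.getD c (0, 0)).2) := by
  by_cases h1 : c = '<'
  · subst h1; simp [pvBDelta_mk, PySem.Dict.getD, PySem.Dict.get?_mk_cons, Prod.ext_iff]; omega
  by_cases h2 : c = '>'
  · subst h2; simp [pvBDelta_mk, PySem.Dict.getD, PySem.Dict.get?_mk_cons, h1]
  by_cases h3 : c = '^'
  · subst h3; simp [pvBDelta_mk, PySem.Dict.getD, PySem.Dict.get?_mk_cons, h1, h2, Prod.ext_iff]; omega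
  by_cases h4 : c = 'v'
  · subst h4; simp [pvBDelta_mk, PySem.Dict.getD, PySem.Dict.get?_mk_cons, h1, h2, h3]
  · simp [pvBDelta_mk, PySem.Dict.getD, PySem.Dict.get?, h1, h2, h3, h4,
          Ne.symm h1, Ne.symm h2, Ne.symm h3, Ne.symm h4]

-- early-break walk misses (3,0) iff (3,0) is not among the visited coordinates
theorem pvWalk_iff (cs : List Char) (cur : Int × Int) (h : cur ≠ ((3 : Int), (0 : Int))) :
    (pvAWalk cur cs ≠ ((3 : Int), (0 : Int))) ↔ ((3 : Int), (0 : Int)) ∉ pvBPositions cur cs := by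
  induction cs generalizing cur with
  | nil => simp [pvAWalk, pvBPositions, h, Ne.symm h]
  | cons c rest ih =>
    rw [pvAWalk, pvBPositions]
    rw [pvStep_eq cur c]
    set cur' := (cur.1 + (pvBDelta.getD c (0, 0)).1, cur.2 + (pvBDelta.getD c (0, 0)).2) with hc'
    by_cases hb : cur' = ((3 : Int), (0 : Int))
    · simp [hb]
      cases rest with
      | nil => simp [pvBPositions]
      | cons d ds => simp [pvBPositions]
    · simp only [if_neg hb]
      rw [ih cur' hb]
      simp [Ne.symm h]

-- the start coordinate is never the forbidden cell (default (0,0) included)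
theorem pvStart_ne (s : String) (hs : Pre_get_safe_paths_from [] s) :
    (pvAButtons.get? s).getD (0, 0) ≠ ((3 : Int), (0 : Int)) := by
  unfold Pre_get_safe_paths_from at hs
  fin_cases hs <;> decide

theorem pvButtons_eq : pvAButtons = pvBButtons := rfl

-- ===== VERDICT (by name: the statement is the Claim_ definition above) =====
theorem get_safe_paths_from_spec : Claim_equal_get_safe_paths_from := by
  intro paths start _ hpre
  unfold Spec_get_safe_paths_from get_safe_paths_from get_safe_paths_from_alt
  rw [← pvButtons_eq]
  rw [PySem.List.foldl_append_ite_eq_filter]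
  simp only [List.nil_append]
  apply List.filter_congr
  intro p _
  have := pvWalk_iff p.toList ((pvAButtons.get? start).getD (0, 0)) (pvStart_ne start hpre)
  simp [this]
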